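-- pv_equiv track=rewrite | github.com/Ulthran/slurm_benchmark | slurm_benchmark/benchmark.py | _select_state
-- ===== SOURCE A (Python) =====
-- from typing import Dict, Iterable, List, Mapping, Optional, Sequence, Tuple
--
-- def _select_state(job_id: str, lines: Sequence[str]) -> Optional[str]:
--     fallback: Optional[str] = None
--     for line in lines:
--         parts = line.split("|")
--         if len(parts) < 2:
--             continue
--         current_job, state = parts[0], parts[1]
--         if current_job == job_id:
--             fallback = state
--         if current_job.startswith(f"{job_id}.") and current_job.endswith(".batch"):
--             return state
--     return fallback
-- ===== SOURCE B (Python) =====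
-- from typing import Optional, Sequence
--
-- def _select_state(job_id: str, lines: Sequence[str]) -> Optional[str]:
--     # Two separate passes over pre-parsed (job, state) pairs instead of one
--     # interleaved loop with a fallback variable.
--     pairs = []
--     for line in lines:
--         parts = line.split("|")
--         if len(parts) >= 2:
--             pairs.append((parts[0], parts[1]))
--     prefix = job_id + "."
--     for job, state in pairs:
--         if job.startswith(prefix) and job.endswith(".batch"):
--             return state
--     result: Optional[str] = None
--     for job, state in pairs:
--         if job == job_id:
--             result = state
--     return result
-- ===== Notes on version B (the rewrite author's own statement) =====
-- stated objective: alternative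
-- what changed: Replaced A's single interleaved loop carrying a fallback variable with an explicit parse pass producing (job,state) pairs followed by two separate scans: first batch match, else last exact match.
import Mathlib
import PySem

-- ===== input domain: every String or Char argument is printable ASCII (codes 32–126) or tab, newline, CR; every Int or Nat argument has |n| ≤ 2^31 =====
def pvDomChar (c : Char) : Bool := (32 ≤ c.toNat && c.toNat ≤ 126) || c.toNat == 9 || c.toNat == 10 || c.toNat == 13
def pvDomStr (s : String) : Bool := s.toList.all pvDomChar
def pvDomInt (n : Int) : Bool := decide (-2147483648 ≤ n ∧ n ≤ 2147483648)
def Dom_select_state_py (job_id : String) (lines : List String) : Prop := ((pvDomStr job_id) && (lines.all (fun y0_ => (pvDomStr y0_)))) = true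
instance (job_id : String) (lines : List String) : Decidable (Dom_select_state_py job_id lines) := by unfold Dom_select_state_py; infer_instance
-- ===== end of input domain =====

-- B replaces A's single interleaved loop (with a fallback variable) by a parse pass into
-- (job,state) pairs followed by two separate scans; same cost, alternative decomposition.

-- ===== PORT A =====
-- one loop over lines carrying the fallback, returning early on a batch match;
-- line.split("|") = (PySem.Str.split? line "|").getD [] (some, since the separator is non-empty);
-- parts[0]/parts[1] are in range (guarded by the length test), ported as List.getD
def selectGoA (job_id : String) (lines : List String) (fallback : Option String) : Option String :=
  match lines with
  | [] => fallback
  | line :: rest =>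
    if ((PySem.Str.split? line "|").getD []).length < 2 then selectGoA job_id rest fallback
    else
      if PySem.Str.startswith (((PySem.Str.split? line "|").getD []).getD 0 "") (job_id ++ ".")
          && PySem.Str.endswith (((PySem.Str.split? line "|").getD []).getD 0 "") ".batch"
      then some (((PySem.Str.split? line "|").getD []).getD 1 "")
      else selectGoA job_id rest
        (if ((PySem.Str.split? line "|").getD []).getD 0 "" == job_id
         then some (((PySem.Str.split? line "|").getD []).getD 1 "") else fallback)

def select_state_py (job_id : String) (lines : List String) : Option String :=
  selectGoA job_id lines none

-- ===== PORT B =====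
-- parse pass of Source B: keep (parts[0], parts[1]) of every line with at least 2 fields
def pvParsePairs (lines : List String) : List (String × String) :=
  lines.filterMap (fun line =>
    if ((PySem.Str.split? line "|").getD []).length ≥ 2
    then some (((PySem.Str.split? line "|").getD []).getD 0 "",
               ((PySem.Str.split? line "|").getD []).getD 1 "")
    else none)

def select_state_py_alt (job_id : String) (lines : List String) : Option String :=
  let pairs := pvParsePairs lines
  match pairs.find? (fun p =>
      PySem.Str.startswith p.1 (job_id ++ ".") && PySem.Str.endswith p.1 ".batch") with
  | some p => some p.2
  | none => pairs.foldl (fun acc p => if p.1 == job_id then some p.2 else acc) none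

-- ===== PRECONDITION & SPEC =====
def Spec_select_state_py (job_id : String) (lines : List String) (out : Option String) : Prop := out = select_state_py_alt job_id lines
instance (job_id : String) (lines : List String) (out : Option String) : Decidable (Spec_select_state_py job_id lines out) := by unfold Spec_select_state_py; infer_instance

-- ===== CLAIM (what is proved, stated in full; the proofs are below) =====
def Claim_equal_select_state_py : Prop := ∀ (job_id : String) (lines : List String), Dom_select_state_py job_id lines → Spec_select_state_py job_id lines (select_state_py job_id lines)

-- ===== LEMMAS AND PROOFS =====
theorem pvParsePairs_cons_skip (line : String) (rest : List String)
    (h : ¬ ((PySem.Str.split? line "|").getD []).length ≥ 2) :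
    pvParsePairs (line :: rest) = pvParsePairs rest := by
  simp [pvParsePairs, h]

theorem pvParsePairs_cons_keep (line : String) (rest : List String)
    (h : ((PySem.Str.split? line "|").getD []).length ≥ 2) :
    pvParsePairs (line :: rest) =
      (((PySem.Str.split? line "|").getD []).getD 0 "",
       ((PySem.Str.split? line "|").getD []).getD 1 "") :: pvParsePairs rest := by
  simp [pvParsePairs, h]

theorem selectGoA_eq (job_id : String) (lines : List String) (fb : Option String) :
    selectGoA job_id lines fb =
      (match (pvParsePairs lines).find? (fun p =>
          PySem.Str.startswith p.1 (job_id ++ ".") && PySem.Str.endswith p.1 ".batch") with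
       | some p => some p.2
       | none => (pvParsePairs lines).foldl
           (fun acc p => if p.1 == job_id then some p.2 else acc) fb) := by
  induction lines generalizing fb with
  | nil => simp [selectGoA, pvParsePairs]
  | cons line rest ih =>
    by_cases hlen : ((PySem.Str.split? line "|").getD []).length < 2
    · rw [pvParsePairs_cons_skip line rest (by omega)]
      simp only [selectGoA, hlen, if_true]
      exact ih fb
    · rw [pvParsePairs_cons_keep line rest (by omega)]
      simp only [selectGoA, hlen, if_false]
      rcases hb : (PySem.Str.startswith (((PySem.Str.split? line "|").getD []).getD 0 "") (job_id ++ ".")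
          && PySem.Str.endswith (((PySem.Str.split? line "|").getD []).getD 0 "") ".batch") with _ | _
      · rw [List.find?_cons_of_neg (by simpa using hb)]
        simp only [List.foldl_cons]
        exact ih _
      · rw [List.find?_cons_of_pos (by simpa using hb)]
        simp

-- ===== VERDICT (by name: the statement is the Claim_ definition above) =====
theorem select_state_py_spec : Claim_equal_select_state_py := by
  intro job_id lines _
  unfold Spec_select_state_py select_state_py select_state_py_alt
  exact selectGoA_eq job_id lines none
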